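-- pv_equiv track=rewrite | github.com/jai-dewani/Competitive-Programming | CodeChef/LTIME82/NSTROT.py | F
-- ===== SOURCE A (Python) =====
-- from math import floor, log2
--
-- def log(a):
--     if a<=1:
--         return 0
--     else:
--         return log(floor(a/2)) + 1
--
-- def F(a,b):
--     n = len(a)
--     posA = [-1]*(n+1)
--     posB = [-1]*(n+1)
--     ret = 0
--     for i in range(n):
--         posA[a[i]] = i
--         posB[b[i]] = i
--     for i in range(1,n+1):
--         ret += log(abs(posA[i]-posB[i]))
--     return ret
-- ===== SOURCE B (Python) =====
-- def F(a, b):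
--     n = len(a)
--     posA = [-1] * (n + 1)
--     posB = [-1] * (n + 1)
--     for i, (x, y) in enumerate(zip(a, b)):
--         posA[x] = i
--         posB[y] = i
--     # Count-by-thresholds: sum of floor(log2 d) over the position differences
--     # equals, for each power of two t >= 2, the number of differences >= t.
--     diffs = [abs(x - y) for x, y in zip(posA[1:], posB[1:])]
--     total = 0
--     t = 2
--     while any(d >= t for d in diffs):
--         total += sum(1 for d in diffs if d >= t)
--         t *= 2
--     return total
-- ===== Notes on version B (the rewrite author's own statement) =====
-- stated objective: alternative
-- what changed: B replaces A's per-element recursive floor-log accumulation by a count-by-thresholds algorithm: it builds the list of absolute position differences once, then repeatedly doubles a threshold t starting at 2 and adds the number of differences >= t, using the identity floor(log2 d) = #{k>=1 : 2^k <= d}; the position arrays are filled in one enumerate(zip) pass.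
import Mathlib
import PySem

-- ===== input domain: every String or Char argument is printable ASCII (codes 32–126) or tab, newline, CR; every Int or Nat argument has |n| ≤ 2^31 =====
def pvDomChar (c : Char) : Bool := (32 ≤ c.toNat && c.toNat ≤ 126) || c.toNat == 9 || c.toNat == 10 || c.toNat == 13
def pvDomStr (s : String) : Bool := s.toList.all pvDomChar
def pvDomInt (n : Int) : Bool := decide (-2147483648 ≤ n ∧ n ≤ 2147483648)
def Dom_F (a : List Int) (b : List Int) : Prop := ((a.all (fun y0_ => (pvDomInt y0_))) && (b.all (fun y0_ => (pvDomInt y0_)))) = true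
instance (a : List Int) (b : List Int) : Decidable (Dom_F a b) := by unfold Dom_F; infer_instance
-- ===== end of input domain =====

-- B replaces A's per-element recursive floor-log sum by a count-by-thresholds pass: for each
-- doubling threshold t = 2, 4, 8, … it adds the number of position differences ≥ t (alternative).

-- ===== PORT A =====
-- A's recursive helper 'log'; floor(a/2) on Python ints of this magnitude is exactly a//2
def pyLog (x : Int) : Int :=
  if h : x ≤ 1 then 0
  else pyLog (PySem.Int.floordiv x 2) + 1
termination_by x.toNat
decreasing_by
  rw [PySem.Int.floordiv_eq_ediv_of_pos (by omega)]
  omega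

def F (a : List Int) (b : List Int) : Int :=
  let n := a.length
  let pos := (PySem.List.pyRange 0 (n : Int) 1).foldl
    (fun (p : List Int × List Int) i =>
      (PySem.List.pySetD p.1 (PySem.List.pyGetD a i 0) i,
       PySem.List.pySetD p.2 (PySem.List.pyGetD b i 0) i))
    (List.replicate (n + 1) (-1 : Int), List.replicate (n + 1) (-1 : Int))
  (PySem.List.pyRange 1 ((n : Int) + 1) 1).foldl
    (fun ret i => ret + pyLog |PySem.List.pyGetD pos.1 i 0 - PySem.List.pyGetD pos.2 i 0|) 0

-- ===== PORT B =====
-- B's 'while any(d >= t for d in diffs): total += sum(1 for d in diffs if d >= t); t *= 2';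
-- the fuel argument only makes the recursion total (the loop runs while t ≤ some d, and t doubles)
def countLoop (fuel : Nat) (diffs : List Int) (t : Int) (total : Int) : Int :=
  match fuel with
  | 0 => total
  | Nat.succ fuel =>
    if diffs.any (fun d => decide (t ≤ d)) then
      countLoop fuel diffs (t * 2)
        (total + diffs.foldl (fun s d => if t ≤ d then s + 1 else s) 0)
    else total

def F_alt (a : List Int) (b : List Int) : Int :=
  let n := a.length
  let pos := (PySem.List.enumerate (a.zip b)).foldl
    (fun (p : List Int × List Int) q =>
      (PySem.List.pySetD p.1 q.2.1 q.1, PySem.List.pySetD p.2 q.2.2 q.1))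
    (List.replicate (n + 1) (-1 : Int), List.replicate (n + 1) (-1 : Int))
  let diffs := ((PySem.List.slice pos.1 (some 1) none).zip
                (PySem.List.slice pos.2 (some 1) none)).map (fun p => |p.1 - p.2|)
  countLoop (diffs.foldl (fun m d => max m d.toNat) 0 + 1) diffs 2 0

-- ===== PRECONDITION & SPEC =====
-- Pre_ is exactly the set of inputs on which A returns (no IndexError): len(b) >= len(a) and
-- every stored value — all of a, the first len(a) entries of b — is a valid index into a list
-- of length len(a)+1, i.e. lies in [-(len(a)+1), len(a)].
def Pre_F (a : List Int) (b : List Int) : Prop :=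
  a.length ≤ b.length ∧
  (∀ x ∈ a, -((a.length : Int) + 1) ≤ x ∧ x ≤ (a.length : Int)) ∧
  (∀ x ∈ b.take a.length, -((a.length : Int) + 1) ≤ x ∧ x ≤ (a.length : Int))
instance (a : List Int) (b : List Int) : Decidable (Pre_F a b) := by unfold Pre_F; infer_instance

def pvWitness_F : List Int × List Int := ([1, 2], [2, 1])

def Spec_F (a : List Int) (b : List Int) (out : Int) : Prop := out = F_alt a b
instance (a : List Int) (b : List Int) (out : Int) : Decidable (Spec_F a b out) := by unfold Spec_F; infer_instance

-- ===== CLAIM (what is proved, stated in full; the proofs are below) =====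
def Claim_equal_F : Prop := ∀ (a : List Int) (b : List Int), Dom_F a b → Pre_F a b → Spec_F a b (F a b)

-- ===== LEMMAS AND PROOFS =====

-- fcount t d = #{j ≥ 0 : t·2^j ≤ d}: the number of further doublings of the threshold t that
-- still do not exceed d; proof-side characterisation of what one element contributes to B's loop
def fcount (t d : Int) : Int :=
  if h : 0 < t ∧ t ≤ d then fcount (t * 2) d + 1 else 0
termination_by (d + 1 - t).toNat
decreasing_by omega

theorem fcount_nonpos (t d : Int) (h : ¬ t ≤ d) : fcount t d = 0 := by
  rw [fcount]; simp [h]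

theorem fcount_of_le (t d : Int) (ht : 0 < t) (h : t ≤ d) :
    fcount t d = fcount (t * 2) d + 1 := by
  conv_lhs => rw [fcount]
  exact dif_pos ⟨ht, h⟩

theorem fcount_step (t d : Int) (ht : 0 < t) :
    fcount t d = (if t ≤ d then 1 else 0) + fcount (t * 2) d := by
  by_cases h : t ≤ d
  · rw [fcount_of_le t d ht h, if_pos h]; ring
  · rw [fcount_nonpos t d h, if_neg h, fcount_nonpos (t * 2) d (by omega)]; ring

theorem fcount_double_aux : ∀ (n : Nat) (t d : Int), (d + 1 - t).toNat ≤ n → 0 < t →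
    fcount (t * 2) d = fcount t (d / 2) := by
  intro n
  induction n with
  | zero =>
    intro t d hb ht
    have h1 : ¬ (t * 2 ≤ d) := by omega
    have h2 : ¬ (t ≤ d / 2) := by
      intro h; have := Int.le_ediv_iff_mul_le (a := t) (b := d) (c := 2) (by omega) |>.mp h; omega
    rw [fcount_nonpos _ _ h1, fcount_nonpos _ _ h2]
  | succ n ih =>
    intro t d hb ht
    by_cases h : t * 2 ≤ d
    · have hdiv : t ≤ d / 2 := (Int.le_ediv_iff_mul_le (by omega)).mpr h
      rw [fcount_of_le (t * 2) d (by omega) h, fcount_of_le t (d / 2) ht hdiv]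
      rw [ih (t * 2) d (by omega) (by omega)]
    · have hdiv : ¬ t ≤ d / 2 := by
        intro hh; exact h ((Int.le_ediv_iff_mul_le (by omega)).mp hh)
      rw [fcount_nonpos _ _ h, fcount_nonpos _ _ hdiv]

theorem fcount_double (t d : Int) (ht : 0 < t) :
    fcount (t * 2) d = fcount t (d / 2) :=
  fcount_double_aux (d + 1 - t).toNat t d le_rfl ht

-- A's recursive log equals the doubling count starting at threshold 2
theorem pyLog_eq_fcount (m : Int) (hm : 0 ≤ m) : pyLog m = fcount 2 m := by
  induction h : m.toNat using Nat.strong_induction_on generalizing m with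
  | _ k ih =>
    by_cases h1 : m ≤ 1
    · rw [pyLog, dif_pos h1, fcount_nonpos 2 m (by omega)]
    · have hfd : PySem.Int.floordiv m 2 = m / 2 :=
        PySem.Int.floordiv_eq_ediv_of_pos (by omega)
      rw [pyLog, dif_neg h1, hfd,
        ih (m / 2).toNat (by omega) (m / 2) (by omega) rfl,
        ← fcount_double 2 m (by omega), fcount_of_le 2 m (by omega) (by omega)]

-- the generator count 'sum(1 for d in diffs if d >= t)' as a sum of indicator terms
theorem foldl_count_eq_sum (t : Int) (l : List Int) : ∀ c : Int,
    l.foldl (fun s d => if t ≤ d then s + 1 else s) c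
      = c + (l.map (fun d => if t ≤ d then (1 : Int) else 0)).sum := by
  induction l with
  | nil => simp
  | cons x xs ih =>
    intro c
    by_cases h : t ≤ x
    · simp only [List.foldl_cons, List.map_cons, List.sum_cons, if_pos h, ih]; ring
    · simp only [List.foldl_cons, List.map_cons, List.sum_cons, if_neg h, ih]; ring

-- one doubling step, summed over the whole list
theorem sum_fcount_split (t : Int) (ht : 0 < t) (l : List Int) :
    (l.map (fcount t)).sum
      = (l.map (fun d => if t ≤ d then (1 : Int) else 0)).sum
        + (l.map (fcount (t * 2))).sum := by
  induction l with
  | nil => simp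
  | cons x xs ih =>
    simp only [List.map_cons, List.sum_cons, ih]
    rw [fcount_step t x ht]
    ring

-- B's while loop computes the total doubling count, given enough fuel
theorem countLoop_eq : ∀ (fuel : Nat) (diffs : List Int) (t total : Int), 0 < t →
    (∀ d ∈ diffs, d < t * 2 ^ fuel) →
    countLoop fuel diffs t total = total + (diffs.map (fcount t)).sum := by
  intro fuel
  induction fuel with
  | zero =>
    intro diffs t total ht hb
    have : (diffs.map (fcount t)).sum = 0 := by
      apply List.sum_eq_zero
      intro x hx
      obtain ⟨d, hd, rfl⟩ := List.mem_map.mp hx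
      exact fcount_nonpos t d (by have := hb d hd; simp at this; omega)
    rw [countLoop, this, add_zero]
  | succ fuel ih =>
    intro diffs t total ht hb
    by_cases hany : diffs.any (fun d => decide (t ≤ d))
    · rw [countLoop, if_pos hany,
        ih diffs (t * 2) _ (by omega)
          (by intro d hd; have := hb d hd; rw [pow_succ] at this; nlinarith),
        foldl_count_eq_sum]
      rw [sum_fcount_split t ht diffs]; ring
    · rw [countLoop, if_neg hany]
      have hnone : ∀ d ∈ diffs, ¬ t ≤ d := by
        intro d hd hle
        exact hany (List.any_eq_true.mpr ⟨d, hd, by simpa using hle⟩)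
      have : (diffs.map (fcount t)).sum = 0 := by
        apply List.sum_eq_zero
        intro x hx
        obtain ⟨d, hd, rfl⟩ := List.mem_map.mp hx
        exact fcount_nonpos t d (hnone d hd)
      rw [this, add_zero]

-- every element is bounded by the foldl-max used as fuel
theorem foldl_max_init_le (l : List Int) : ∀ acc : Nat,
    acc ≤ l.foldl (fun m x => max m x.toNat) acc := by
  induction l with
  | nil => intro acc; simp
  | cons x xs ih =>
    intro acc
    exact le_trans (le_max_left acc x.toNat) (ih _)

theorem le_foldl_max (l : List Int) (x : Int) (hx : x ∈ l) : ∀ acc : Nat,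
    x.toNat ≤ l.foldl (fun m x => max m x.toNat) acc := by
  induction l with
  | nil => cases hx
  | cons y ys ih =>
    intro acc
    rcases List.mem_cons.mp hx with rfl | hmem
    · exact le_trans (le_max_right acc x.toNat) (foldl_max_init_le ys _)
    · exact ih hmem _

-- PySem.List.enumerate as a map over range
theorem enumerate_eq_map {α : Type} (l : List α) (d : α) (s : Int) :
    PySem.List.enumerate l s
      = (List.range l.length).map (fun j : Nat => (s + (j : Int), l.getD j d)) := by
  induction l generalizing s with
  | nil => simp [PySem.List.enumerate_nil]
  | cons x t ih =>
    rw [PySem.List.enumerate_cons, ih (s + 1)]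
    simp only [List.length_cons, List.range_succ_eq_map, List.map_cons, List.map_map]
    refine List.cons_eq_cons.mpr ⟨by simp, ?_⟩
    apply List.map_congr_left
    intro j _
    simp only [Function.comp_apply, List.getD_cons_succ, Prod.mk.injEq]
    exact ⟨by push_cast; ring, by trivial⟩

-- pyRange a (a+n) 1 as a map over range
theorem pyRange_one_map (a : Int) (n : Nat) :
    PySem.List.pyRange a (a + n) 1 = (List.range n).map (fun j : Nat => a + j) := by
  induction n generalizing a with
  | zero => simp [PySem.List.pyRange]
  | succ n ih =>
    rw [PySem.List.pyRange_one_cons (by omega),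
      show a + ((n + 1 : Nat) : Int) = (a + 1) + (n : Nat) by push_cast; ring, ih (a + 1)]
    rw [List.range_succ_eq_map]
    simp only [List.map_cons, List.map_map]
    refine List.cons_eq_cons.mpr ⟨by simp, ?_⟩
    apply List.map_congr_left
    intro j _
    simp only [Function.comp_apply]
    push_cast; ring

-- the population fold keeps both lists at length n+1 (generic in the index list and stored values)
theorem fold_lengths {ι : Type} (l : List ι) (u v w : ι → Int) :
    ∀ p : List Int × List Int,
      ((l.foldl (fun (p : List Int × List Int) j =>
          (PySem.List.pySetD p.1 (u j) (v j), PySem.List.pySetD p.2 (w j) (v j))) p).1.length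
        = p.1.length ∧
       (l.foldl (fun (p : List Int × List Int) j =>
          (PySem.List.pySetD p.1 (u j) (v j), PySem.List.pySetD p.2 (w j) (v j))) p).2.length
        = p.2.length) := by
  induction l with
  | nil => intro p; exact ⟨rfl, rfl⟩
  | cons x xs ih =>
    intro p
    have := ih (PySem.List.pySetD p.1 (u x) (v x), PySem.List.pySetD p.2 (w x) (v x))
    simpa [PySem.List.length_pySetD] using this

-- ===== VERDICT (by name: the statement is the Claim_ definition above) =====
theorem F_spec : Claim_equal_F := by
  intro a b _ hpre
  obtain ⟨hlen, -, -⟩ := hpre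
  show F a b = F_alt a b
  have hz : (a.zip b).length = a.length := by rw [List.length_zip]; omega
  set P := (List.range a.length).foldl
      (fun (p : List Int × List Int) (j : Nat) =>
        (PySem.List.pySetD p.1 ((a.zip b).getD j (0, 0)).1 ((0 : Int) + (j : Int)),
         PySem.List.pySetD p.2 ((a.zip b).getD j (0, 0)).2 ((0 : Int) + (j : Int))))
      (List.replicate (a.length + 1) (-1 : Int), List.replicate (a.length + 1) (-1 : Int))
      with hP
  -- B's population loop computes P
  have hpopB : (PySem.List.enumerate (a.zip b)).foldl
      (fun (p : List Int × List Int) q =>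
        (PySem.List.pySetD p.1 q.2.1 q.1, PySem.List.pySetD p.2 q.2.2 q.1))
      (List.replicate (a.length + 1) (-1 : Int), List.replicate (a.length + 1) (-1 : Int)) = P := by
    rw [enumerate_eq_map (a.zip b) (0, 0) 0, hz, List.foldl_map, hP]
  -- A's population loop computes P too: same slots, same stored indices
  have hpopA : (PySem.List.pyRange 0 (a.length : Int) 1).foldl
      (fun (p : List Int × List Int) i =>
        (PySem.List.pySetD p.1 (PySem.List.pyGetD a i 0) i,
         PySem.List.pySetD p.2 (PySem.List.pyGetD b i 0) i))
      (List.replicate (a.length + 1) (-1 : Int), List.replicate (a.length + 1) (-1 : Int)) = P := by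
    rw [PySem.List.pyRange_zero_nat a.length, List.foldl_map, hP]
    refine PySem.List.foldl_congr_mem' (List.range a.length) _ _ _ ?_
    intro j hj s
    have hja : j < a.length := List.mem_range.mp hj
    have hjb : j < b.length := by omega
    have hzj : (a.zip b).getD j (0, 0) = (a[j], b[j]) := by
      rw [List.getD_eq_getElem _ _ (by rw [hz]; exact hja), List.getElem_zip]
    simp only [hzj, zero_add, PySem.List.pyGetD_natCast, List.getD_eq_getElem a 0 hja,
      List.getD_eq_getElem b 0 hjb]
  have hPlen := fold_lengths (List.range a.length)
    (fun j : Nat => ((a.zip b).getD j (0, 0)).1) (fun j : Nat => (0 : Int) + (j : Int))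
    (fun j : Nat => ((a.zip b).getD j (0, 0)).2)
    (List.replicate (a.length + 1) (-1 : Int), List.replicate (a.length + 1) (-1 : Int))
  have hP1 : P.1.length = a.length + 1 := by rw [hP]; simpa using hPlen.1
  have hP2 : P.2.length = a.length + 1 := by rw [hP]; simpa using hPlen.2
  clear_value P
  simp only [F, F_alt]
  rw [hpopA, hpopB]
  -- A's second loop as a sum over range
  rw [PySem.List.foldl_add _
      (fun i : Int => pyLog |PySem.List.pyGetD P.1 i 0 - PySem.List.pyGetD P.2 i 0|) 0,
    zero_add,
    show ((a.length : Int) + 1) = (1 : Int) + (a.length : Nat) by omega,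
    pyRange_one_map 1 a.length, List.map_map]
  simp only [Function.comp_def]
  -- B's slices
  rw [PySem.List.slice_from_one, PySem.List.slice_from_one]
  set diffs := (P.1.tail.zip P.2.tail).map (fun p => |p.1 - p.2|) with hdiffs
  set M := diffs.foldl (fun m d => max m d.toNat) 0 with hM
  -- B's while loop
  have hfuel : ∀ d ∈ diffs, d < 2 * 2 ^ (M + 1) := by
    intro d hd
    have h1 : d.toNat ≤ M := le_foldl_max diffs d hd 0
    have h2 : M < 2 ^ (M + 1) :=
      lt_of_lt_of_le (Nat.lt_two_pow_self) (Nat.pow_le_pow_right (by norm_num) (Nat.le_succ _))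
    have h3 : (M : Int) < 2 * 2 ^ (M + 1) := by
      have : ((M : Nat) : Int) < ((2 ^ (M + 1) : Nat) : Int) := by exact_mod_cast h2
      push_cast at this
      have hpos : (0 : Int) < 2 ^ (M + 1) := by positivity
      omega
    have h4 : d ≤ (M : Int) :=
      le_trans (Int.self_le_toNat d) (by exact_mod_cast h1)
    omega
  rw [countLoop_eq (M + 1) diffs 2 0 (by norm_num) hfuel, zero_add]
  -- the summed lists are equal, then pointwise pyLog = fcount 2
  have hlist : (List.range a.length).map
      (fun j : Nat =>
        |PySem.List.pyGetD P.1 (1 + (j : Int)) 0 - PySem.List.pyGetD P.2 (1 + (j : Int)) 0|)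
        = (P.1.tail.zip P.2.tail).map (fun p => |p.1 - p.2|) := by
    apply List.ext_getElem
    · simp [List.length_zip, hP1, hP2]
    · intro j hj1 hj2
      simp only [List.getElem_map, List.getElem_range, List.getElem_zip, List.getElem_tail]
      have hj : j < a.length := by simpa using hj1
      have e1 : PySem.List.pyGetD P.1 (1 + (j : Int)) 0 = P.1[j + 1] := by
        rw [show (1 + (j : Int)) = ((j + 1 : Nat) : Int) by push_cast; ring,
          PySem.List.pyGetD_natCast, List.getD_eq_getElem P.1 0 (by omega)]
      have e2 : PySem.List.pyGetD P.2 (1 + (j : Int)) 0 = P.2[j + 1] := by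
        rw [show (1 + (j : Int)) = ((j + 1 : Nat) : Int) by push_cast; ring,
          PySem.List.pyGetD_natCast, List.getD_eq_getElem P.2 0 (by omega)]
      rw [e1, e2]
  calc ((List.range a.length).map
        (fun j : Nat =>
          pyLog |PySem.List.pyGetD P.1 (1 + (j : Int)) 0 - PySem.List.pyGetD P.2 (1 + (j : Int)) 0|)).sum
      = (((List.range a.length).map
          (fun j : Nat =>
            |PySem.List.pyGetD P.1 (1 + (j : Int)) 0 - PySem.List.pyGetD P.2 (1 + (j : Int)) 0|)).map
          pyLog).sum := by rw [List.map_map]; rfl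
    _ = (diffs.map pyLog).sum := by rw [hlist, hdiffs]
    _ = (diffs.map (fcount 2)).sum := by
          congr 1
          apply List.map_congr_left
          intro x hx
          rw [hdiffs] at hx
          obtain ⟨p, -, rfl⟩ := List.mem_map.mp hx
          exact pyLog_eq_fcount _ (abs_nonneg _)
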